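-- pv_equiv track=rewrite | github.com/JVKW/ES-Faculdade-UFC2025.2 | semestre1/FUP/04 - Comandos de decisão e quebras em comandos de repetição/atv31.py | cal_intervalo
-- ===== SOURCE A (Python) =====
-- def cal_intervalo(maior, menor):
--     soma_pares = 0
--     mult_impar = 1
--
--     for i in range(menor, maior+1):
--         if i % 2 == 0:
--             soma_pares += i
--         else:
--             mult_impar *= i
--     return soma_pares, mult_impar
-- ===== SOURCE B (Python) =====
-- def cal_intervalo(maior, menor):
--     # even sum via arithmetic-series formula; odd product loops over odds only
--     if menor > maior:
--         return 0, 1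
--     first_even = menor if menor % 2 == 0 else menor + 1
--     last_even = maior if maior % 2 == 0 else maior - 1
--     if last_even < first_even:
--         soma_pares = 0
--     else:
--         n = (last_even - first_even) // 2 + 1
--         soma_pares = (first_even + last_even) * n // 2
--     first_odd = menor if menor % 2 != 0 else menor + 1
--     mult_impar = 1
--     for i in range(first_odd, maior + 1, 2):
--         mult_impar *= i
--     return soma_pares, mult_impar
-- ===== Notes on version B (the rewrite author's own statement) =====
-- stated objective: alternative
-- what changed: Even sum computed by the closed-form arithmetic-series formula instead of accumulation, and the odd product loops only over the odd numbers with step 2, removing the per-element parity branch; overall cost stays dominated by the big-integer product, so no speed is claimed.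
import Mathlib
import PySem

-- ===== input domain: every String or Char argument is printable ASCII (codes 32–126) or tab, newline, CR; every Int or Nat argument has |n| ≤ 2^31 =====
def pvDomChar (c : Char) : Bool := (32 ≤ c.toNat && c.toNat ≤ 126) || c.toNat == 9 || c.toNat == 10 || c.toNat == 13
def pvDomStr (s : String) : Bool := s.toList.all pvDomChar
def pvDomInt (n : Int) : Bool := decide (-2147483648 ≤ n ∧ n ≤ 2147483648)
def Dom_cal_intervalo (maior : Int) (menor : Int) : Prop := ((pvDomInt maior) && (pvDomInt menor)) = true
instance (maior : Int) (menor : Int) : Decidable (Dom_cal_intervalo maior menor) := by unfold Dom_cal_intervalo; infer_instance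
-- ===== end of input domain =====

-- B replaces the even-sum accumulation by the closed-form arithmetic-series formula and
-- loops only over the odd numbers (step 2) for the product (alternative decomposition, same cost).

-- ===== PORT A =====
-- the loop body of A: branch on parity, add to the even sum or multiply into the odd product
def pvStepA (st : Int × Int) (i : Int) : Int × Int :=
  if PySem.Int.mod i 2 == 0 then (st.1 + i, st.2) else (st.1, st.2 * i)

def cal_intervalo (maior : Int) (menor : Int) : Int × Int :=
  (PySem.List.pyRange menor (maior + 1) 1).foldl pvStepA (0, 1)

-- ===== PORT B =====
def cal_intervalo_alt (maior : Int) (menor : Int) : Int × Int :=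
  if maior < menor then (0, 1)
  else
    let firstEven := if PySem.Int.mod menor 2 == 0 then menor else menor + 1
    let lastEven := if PySem.Int.mod maior 2 == 0 then maior else maior - 1
    let soma :=
      if lastEven < firstEven then 0
      else
        let n := PySem.Int.floordiv (lastEven - firstEven) 2 + 1
        PySem.Int.floordiv ((firstEven + lastEven) * n) 2
    let firstOdd := if PySem.Int.mod menor 2 == 0 then menor + 1 else menor
    let mult := (PySem.List.pyRange firstOdd (maior + 1) 2).foldl (· * ·) 1
    (soma, mult)

-- ===== PRECONDITION & SPEC =====
def Spec_cal_intervalo (maior : Int) (menor : Int) (out : Int × Int) : Prop := out = cal_intervalo_alt maior menor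
instance (maior : Int) (menor : Int) (out : Int × Int) : Decidable (Spec_cal_intervalo maior menor out) := by unfold Spec_cal_intervalo; infer_instance

-- ===== CLAIM (what is proved, stated in full; the proofs are below) =====
def Claim_equal_cal_intervalo : Prop := ∀ (maior : Int) (menor : Int), Dom_cal_intervalo maior menor → Spec_cal_intervalo maior menor (cal_intervalo maior menor)

-- ===== LEMMAS AND PROOFS =====

-- A's fold is linear in its accumulator
theorem pv_foldA_lin (l : List Int) : ∀ (s m : Int),
    l.foldl pvStepA (s, m) = (s + (l.foldl pvStepA (0, 1)).1, m * (l.foldl pvStepA (0, 1)).2) := by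
  induction l with
  | nil => intro s m; simp
  | cons a t ih =>
    intro s m
    simp only [List.foldl_cons, pvStepA]
    by_cases h : PySem.Int.mod a 2 == 0
    · simp only [h, if_true]
      rw [ih (s + a) m, ih (0 + a) 1]
      refine Prod.ext ?_ ?_ <;> simp <;> ring
    · simp only [h, Bool.false_eq_true, if_false]
      rw [ih s (m * a), ih 0 (1 * a)]
      refine Prod.ext ?_ ?_ <;> simp <;> ring

-- multiplication fold is linear in its accumulator
theorem pv_foldMul_lin (l : List Int) : ∀ (m : Int),
    l.foldl (· * ·) m = m * l.foldl (· * ·) 1 := by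
  induction l with
  | nil => intro m; simp
  | cons a t ih => intro m; simp only [List.foldl_cons]; rw [ih (m * a), ih (1 * a)]; ring

-- cons form of a step-2 range
theorem pv_pyRange_two_cons (a b : Int) (h : a < b) :
    PySem.List.pyRange a b 2 = a :: PySem.List.pyRange (a + 2) b 2 := by
  rw [PySem.List.pyRange_of_pos a b (by norm_num), PySem.List.pyRange_of_pos (a + 2) b (by norm_num)]
  by_cases h2 : a + 2 < b
  · have hn : (if a < b then ((b - a + 2 - 1) / 2).toNat else 0)
        = (if a + 2 < b then ((b - (a + 2) + 2 - 1) / 2).toNat else 0) + 1 := by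
      simp only [if_pos h, if_pos h2]; omega
    rw [hn, List.range_succ_eq_map]
    simp only [List.map_cons, List.map_map]
    refine List.cons_eq_cons.mpr ⟨by simp, List.map_congr_left fun k _ => ?_⟩
    simp only [Function.comp_apply]
    push_cast
    ring
  · have hn : (if a < b then ((b - a + 2 - 1) / 2).toNat else 0) = 1 := by
      simp only [if_pos h]; omega
    have hn2 : (if a + 2 < b then ((b - (a + 2) + 2 - 1) / 2).toNat else 0) = 0 := by
      simp [h2]
    rw [hn, hn2]
    simp

theorem pv_pyRange_two_nil (a b : Int) (h : b ≤ a) : PySem.List.pyRange a b 2 = [] := by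
  rw [PySem.List.pyRange_of_pos a b (by norm_num)]
  simp [show ¬ a < b by omega]

-- B satisfies the same head-recurrence as A's loop (peeling the bottom element menor)
theorem pv_alt_rec (maior menor : Int) (h : menor ≤ maior) :
    cal_intervalo_alt maior menor =
      ((if PySem.Int.mod menor 2 == 0 then menor else 0) + (cal_intervalo_alt maior (menor + 1)).1,
       (if PySem.Int.mod menor 2 == 0 then 1 else menor) * (cal_intervalo_alt maior (menor + 1)).2) := by
  have hm2 : PySem.Int.mod menor 2 = menor % 2 := PySem.Int.mod_eq_emod_of_pos (by norm_num)
  have hma2 : PySem.Int.mod maior 2 = maior % 2 := PySem.Int.mod_eq_emod_of_pos (by norm_num)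
  have hm12 : PySem.Int.mod (menor + 1) 2 = (menor + 1) % 2 := PySem.Int.mod_eq_emod_of_pos (by norm_num)
  unfold cal_intervalo_alt
  rw [if_neg (by omega)]
  by_cases hpar : menor % 2 = 0
  · -- menor even: even-sum recurrence, odd range unchanged
    have he : (PySem.Int.mod menor 2 == 0) = true := by rw [hm2]; simp [hpar]
    simp only [he, if_pos, if_true]
    by_cases htop : maior < menor + 1
    · -- maior = menor (even): recursive call is the empty case
      have hmm : maior = menor := by omega
      rw [if_pos htop]
      subst hmm
      have hle : (if PySem.Int.mod maior 2 == 0 then maior else maior - 1) = maior := by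
        rw [hma2]; simp [hpar]
      rw [hle, if_neg (by omega)]
      have hfd1 : PySem.Int.floordiv (maior - maior) 2 = 0 := by
        rw [PySem.Int.floordiv_eq_ediv_of_pos (by norm_num)]; simp
      rw [hfd1]
      have hfd2 : PySem.Int.floordiv ((maior + maior) * (0 + 1)) 2 = maior := by
        rw [PySem.Int.floordiv_eq_ediv_of_pos (by norm_num)]
        have : (maior + maior) * (0 + 1) = 2 * maior := by ring
        rw [this, Int.mul_ediv_cancel_left _ (by norm_num)]
      rw [hfd2, pv_pyRange_two_nil (maior + 1) (maior + 1) (by omega)]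
      simp
    · rw [if_neg htop]
      have he1 : (PySem.Int.mod (menor + 1) 2 == 0) = false := by rw [hm12]; simp; omega
      simp only [he1, Bool.false_eq_true, if_false]
      have hfe2 : menor + 1 + 1 = menor + 2 := by ring
      rw [hfe2]
      -- the odd-product ranges coincide; the sums obey the Gauss recurrence
      refine Prod.ext ?_ (by simp)
      simp only
      set le := (if PySem.Int.mod maior 2 == 0 then maior else maior - 1) with hledef
      have hle2 : le % 2 = 0 := by
        rw [hledef, hma2]
        rcases Int.emod_two_eq maior with h | h <;> simp [h] <;> omega
      have hlege : menor ≤ le := by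
        rw [hledef, hma2]
        rcases Int.emod_two_eq maior with h | h <;> simp [h] <;> omega
      rw [if_neg (by omega)]
      obtain ⟨d, hd0, hdle⟩ : ∃ d : Int, 0 ≤ d ∧ le = menor + 2 * d := by
        refine ⟨(le - menor) / 2, by omega, by omega⟩
      by_cases hsmall : le < menor + 2
      · -- only one even (= menor) in the range
        rw [if_pos hsmall]
        have hd : d = 0 := by omega
        have hfd1 : PySem.Int.floordiv (le - menor) 2 = 0 := by
          rw [PySem.Int.floordiv_eq_ediv_of_pos (by norm_num)]; omega
        rw [hfd1]
        rw [PySem.Int.floordiv_eq_ediv_of_pos (by norm_num)]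
        have : (menor + le) * (0 + 1) = 2 * menor := by rw [hdle, hd]; ring
        rw [this, Int.mul_ediv_cancel_left _ (by norm_num)]
        ring
      · rw [if_neg hsmall]
        have hd1 : 1 ≤ d := by omega
        have hfd1 : PySem.Int.floordiv (le - menor) 2 = d := by
          rw [PySem.Int.floordiv_eq_ediv_of_pos (by norm_num)]; omega
        have hfd2 : PySem.Int.floordiv (le - (menor + 2)) 2 = d - 1 := by
          rw [PySem.Int.floordiv_eq_ediv_of_pos (by norm_num)]; omega
        rw [hfd1, hfd2]
        rw [PySem.Int.floordiv_eq_ediv_of_pos (by norm_num),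
            PySem.Int.floordiv_eq_ediv_of_pos (by norm_num)]
        have e1 : (menor + le) * (d + 1) = 2 * ((menor + d) * (d + 1)) := by rw [hdle]; ring
        have e2 : (menor + 2 + le) * (d - 1 + 1) = 2 * ((menor + 1 + d) * d) := by rw [hdle]; ring
        rw [e1, e2, Int.mul_ediv_cancel_left _ (by norm_num), Int.mul_ediv_cancel_left _ (by norm_num)]
        ring
  · -- menor odd: sums coincide, odd product peels menor
    have hpar1 : menor % 2 = 1 := by omega
    have ho : (PySem.Int.mod menor 2 == 0) = false := by rw [hm2]; simp [hpar1]
    have he1 : (PySem.Int.mod (menor + 1) 2 == 0) = true := by rw [hm12]; simp; omega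
    simp only [ho, he1, Bool.false_eq_true, if_false, if_true]
    by_cases htop : maior < menor + 1
    · -- maior = menor (odd): recursive call is the empty case
      have hmm : maior = menor := by omega
      rw [if_pos htop]
      subst hmm
      have hle : (if PySem.Int.mod maior 2 == 0 then maior else maior - 1) = maior - 1 := by
        rw [hma2]; simp [hpar1]
      rw [hle, if_pos (by omega)]
      rw [pv_pyRange_two_cons maior (maior + 1) (by omega),
          pv_pyRange_two_nil (maior + 2) (maior + 1) (by omega)]
      simp
    · rw [if_neg htop]
      refine Prod.ext (by simp) ?_
      simp only
      rw [pv_pyRange_two_cons menor (maior + 1) (by omega)]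
      simp only [List.foldl_cons]
      rw [pv_foldMul_lin _ (1 * menor)]
      ring_nf

-- the main equivalence, by induction on the length of the range
theorem pv_main : ∀ (n : Nat) (maior menor : Int), (maior + 1 - menor).toNat = n →
    cal_intervalo maior menor = cal_intervalo_alt maior menor := by
  intro n
  induction n with
  | zero =>
    intro maior menor hn
    unfold cal_intervalo cal_intervalo_alt
    rw [PySem.List.pyRange_one_eq_nil (by omega), if_pos (by omega)]
    simp
  | succ k ih =>
    intro maior menor hn
    have hle : menor ≤ maior := by omega
    unfold cal_intervalo
    rw [PySem.List.pyRange_one_cons (by omega)]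
    simp only [List.foldl_cons]
    have hstep : pvStepA (0, 1) menor =
        ((if PySem.Int.mod menor 2 == 0 then menor else 0),
         (if PySem.Int.mod menor 2 == 0 then 1 else menor)) := by
      by_cases h : PySem.Int.mod menor 2 == 0 <;>
        simp only [pvStepA, h, if_true, Bool.false_eq_true, if_false] <;> simp
    rw [hstep]
    rw [show ((if PySem.Int.mod menor 2 == 0 then menor else 0),
             (if PySem.Int.mod menor 2 == 0 then 1 else menor)) =
          (((if PySem.Int.mod menor 2 == 0 then menor else 0) : Int),
           ((if PySem.Int.mod menor 2 == 0 then 1 else menor) : Int)) from rfl]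
    rw [pv_foldA_lin]
    have hA : (PySem.List.pyRange (menor + 1) (maior + 1) 1).foldl pvStepA (0, 1)
        = cal_intervalo maior (menor + 1) := rfl
    rw [hA, ih maior (menor + 1) (by omega), pv_alt_rec maior menor hle]

-- ===== VERDICT (by name: the statement is the Claim_ definition above) =====
theorem cal_intervalo_spec : Claim_equal_cal_intervalo := by
  intro maior menor _
  unfold Spec_cal_intervalo
  exact pv_main ((maior + 1 - menor).toNat) maior menor rfl
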